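-- pv_equiv track=rewrite | github.com/GorojanamLokesh/Jtd-Devsnest_Bootcamp | Basic.py | solve
-- ===== SOURCE A (Python) =====
-- def solve(n):
--     result = []
--     for i in range(1,n+1):
--         half_stair=''
--         for j in range(1,i+1):
--             half_stair+=str(j)
--         full_stair= half_stair+half_stair[-2::-1]
--         result.append(full_stair)
--     return result
-- ===== SOURCE B (Python) =====
-- def solve(n):
--     result = []
--     half_stair = ''
--     for i in range(1, n + 1):
--         half_stair += str(i)
--         result.append(half_stair + half_stair[-2::-1])
--     return result
-- ===== Notes on version B (the rewrite author's own statement) =====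
-- stated objective: simpler
-- what changed: B carries the growing half-stair string as an accumulator across rows instead of rebuilding it with an inner loop for every row, turning A's nested loops into a single pass.
import Mathlib
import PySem

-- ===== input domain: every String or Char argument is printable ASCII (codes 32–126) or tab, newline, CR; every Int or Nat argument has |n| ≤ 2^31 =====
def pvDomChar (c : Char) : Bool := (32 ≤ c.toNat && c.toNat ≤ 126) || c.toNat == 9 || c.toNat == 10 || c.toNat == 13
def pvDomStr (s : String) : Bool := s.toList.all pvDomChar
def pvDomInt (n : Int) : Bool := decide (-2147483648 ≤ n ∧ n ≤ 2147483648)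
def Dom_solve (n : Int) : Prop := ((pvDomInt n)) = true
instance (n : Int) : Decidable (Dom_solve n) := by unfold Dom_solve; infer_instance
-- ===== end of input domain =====

-- B replaces A's per-row inner rebuild loop with a half-stair accumulator carried across rows (single pass, same values).
-- Python strings are represented as List Char (PySem.Chars side) and wrapped with String.ofList; exact on the domain.

-- ===== PORT A =====
-- full_stair = half_stair + half_stair[-2::-1]  (slice? step -1; total for step ≠ 0)
def pvMirror (half : List Char) : List Char :=
  half ++ (PySem.List.slice? half (some (-2)) none (-1)).getD []

def solve (n : Int) : List String :=
  (PySem.List.pyRange 1 (n + 1) 1).foldl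
    (fun result i =>
      let half := (PySem.List.pyRange 1 (i + 1) 1).foldl
        (fun h j => h ++ PySem.Int.toChars j) ([] : List Char)
      result ++ [String.ofList (pvMirror half)])
    []

-- ===== PORT B =====
def solve_alt (n : Int) : List String :=
  ((PySem.List.pyRange 1 (n + 1) 1).foldl
    (fun (st : List Char × List String) i =>
      let half := st.1 ++ PySem.Int.toChars i
      (half, st.2 ++ [String.ofList (pvMirror half)]))
    (([] : List Char), ([] : List String))).2

-- ===== PRECONDITION & SPEC =====
def Spec_solve (n : Int) (out : List String) : Prop := out = solve_alt n
instance (n : Int) (out : List String) : Decidable (Spec_solve n out) := by unfold Spec_solve; infer_instance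

-- ===== CLAIM (what is proved, stated in full; the proofs are below) =====
def Claim_equal_solve : Prop := ∀ (n : Int), Dom_solve n → Spec_solve n (solve n)

-- ===== LEMMAS AND PROOFS =====

-- inner rebuild of row i
def pvHalf (i : Int) : List Char :=
  (PySem.List.pyRange 1 (i + 1) 1).foldl (fun h j => h ++ PySem.Int.toChars j) []

lemma pvHalf_succ (k : Nat) :
    pvHalf ((k : Int) + 1) = pvHalf k ++ PySem.Int.toChars ((k : Int) + 1) := by
  unfold pvHalf
  rw [PySem.List.pyRange_one_succ_right (by exact_mod_cast Nat.succ_le_succ (Nat.zero_le k))]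
  simp

lemma pv_invariant (k : Nat) :
    (PySem.List.pyRange 1 ((k : Int) + 1) 1).foldl
      (fun (st : List Char × List String) i =>
        let half := st.1 ++ PySem.Int.toChars i
        (half, st.2 ++ [String.ofList (pvMirror half)]))
      (([] : List Char), ([] : List String))
    = (pvHalf k,
       (PySem.List.pyRange 1 ((k : Int) + 1) 1).foldl
         (fun result i => result ++ [String.ofList (pvMirror (pvHalf i))]) []) := by
  induction k with
  | zero =>
      simp only [Nat.cast_zero, zero_add]
      rw [PySem.List.pyRange_one_eq_nil le_rfl]
      simp [pvHalf, PySem.List.pyRange_one_eq_nil (le_refl (1 : Int))]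
  | succ k ih =>
      have hc : ((k + 1 : Nat) : Int) = (k : Int) + 1 := by push_cast; ring
      rw [hc, PySem.List.pyRange_one_succ_right (by omega : (1:Int) ≤ (k : Int) + 1)]
      rw [List.foldl_append, List.foldl_append, ih]
      simp only [List.foldl_cons, List.foldl_nil]
      rw [pvHalf_succ k]

-- ===== VERDICT (by name: the statement is the Claim_ definition above) =====
theorem solve_spec : Claim_equal_solve := by
  intro n _
  unfold Spec_solve solve solve_alt
  by_cases hn : n ≤ 0
  · rw [PySem.List.pyRange_one_eq_nil (by omega)]
    rfl
  · obtain ⟨k, hk⟩ : ∃ k : Nat, n = (k : Int) := ⟨n.toNat, by omega⟩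
    subst hk
    rw [pv_invariant k]
    rfl
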